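-- pv_equiv track=rewrite | github.com/nsky80/competitive_programming | HackerEarth/April Easy' 19/One Girl One Sequence.py | check_min_cost
-- ===== SOURCE A (Python) =====
-- def check_min_cost(n, x, a):
--     cost = 0
--     idx = n
--     for i in range(n):
--         temp = a.index(max(a))
--         if x < idx-temp-1:
--             cost += x
--             a.remove(min(a))
--         else:
--             a.pop(temp)
--             cost += idx-temp-1
--         idx -= 1
--     return cost
-- ===== SOURCE B (Python) =====
-- def _lowbound(arr, val, lo, hi):
--     # first index i in [lo, hi) with arr[i] >= val (arr sorted ascending)
--     while lo < hi:
--         mid = (lo + hi) // 2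
--         if arr[mid] < val:
--             lo = mid + 1
--         else:
--             hi = mid
--     return lo
--
--
-- def _group_start(S, vmax, lo, hi):
--     # first index i in [lo, hi) with S[i][0] >= vmax (S sorted ascending)
--     while lo < hi:
--         mid = (lo + hi) // 2
--         if S[mid][0] < vmax:
--             lo = mid + 1
--         else:
--             hi = mid
--     return lo
--
--
-- def check_min_cost(n, x, a):
--     # Decorate-and-sort: simulate on the value-sorted list of (value, position)
--     # pairs plus a sorted list of alive positions; each step locates the first
--     # max / first min by binary search instead of A's linear scans.
--     # Return-value equivalent to A; unlike A, does not mutate `a`.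
--     S = sorted((v, p) for p, v in enumerate(a))
--     POS = list(range(len(a)))
--     cost = 0
--     idx = n
--     for _ in range(n):
--         vmax = S[-1][0]
--         j = _group_start(S, vmax, 0, len(S) - 1)
--         pstar = S[j][1]
--         t = _lowbound(POS, pstar, 0, len(POS))
--         r = idx - t - 1
--         if x < r:
--             cost += x
--             i0 = _lowbound(POS, S[0][1], 0, len(POS))
--             del POS[i0]
--             S.pop(0)
--         else:
--             S.pop(j)
--             del POS[t]
--             cost += r
--         idx -= 1
--     return cost
-- ===== Notes on version B (the rewrite author's own statement) =====
-- stated objective: faster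
-- what changed: B sorts (value, position) pairs once and simulates on the value-sorted list plus a sorted alive-position list, locating the first max / first min and their ranks by hand-rolled binary searches and index deletions instead of A's four linear max/index/min/remove scans of the mutating list per step.
import Mathlib
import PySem

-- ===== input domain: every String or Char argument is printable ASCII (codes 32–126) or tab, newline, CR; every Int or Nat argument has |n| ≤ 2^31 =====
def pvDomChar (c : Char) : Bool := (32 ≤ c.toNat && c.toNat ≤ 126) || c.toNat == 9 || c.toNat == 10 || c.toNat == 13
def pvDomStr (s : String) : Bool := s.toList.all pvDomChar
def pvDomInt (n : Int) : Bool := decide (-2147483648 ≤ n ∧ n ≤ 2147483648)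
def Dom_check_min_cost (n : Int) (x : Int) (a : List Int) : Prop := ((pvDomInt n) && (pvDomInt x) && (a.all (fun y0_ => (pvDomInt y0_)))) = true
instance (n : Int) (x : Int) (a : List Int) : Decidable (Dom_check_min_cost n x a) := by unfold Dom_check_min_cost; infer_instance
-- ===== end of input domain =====

-- B re-implements A on a once-sorted list of (value, position) pairs instead of A's repeated
-- max/index/min/remove scans of the mutating list; equivalence is about the RETURN value only
-- (A mutates its argument `a` in place, B does not).

-- ===== PORT A =====
-- loop body of A's `for i in range(n)` (state: current list, idx, cost)
def stepA (x : Int) (s : List Int × Int × Int) : List Int × Int × Int :=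
  match PySem.List.max? s.1 (fun v => v) with
  | none => s            -- Python: max(a) raises ValueError on empty (outside Pre_)
  | some m =>
    let temp : Int := ((PySem.List.index? s.1 m).getD 0 : Nat)
    if x < s.2.1 - temp - 1 then
      match PySem.List.min? s.1 (fun v => v) with
      | none => s
      | some mn => ((PySem.List.remove? s.1 mn).getD s.1, s.2.1 - 1, s.2.2 + x)
    else
      (((PySem.List.pop? s.1 temp).map Prod.snd).getD s.1, s.2.1 - 1, s.2.2 + (s.2.1 - temp - 1))

def check_min_cost (n : Int) (x : Int) (a : List Int) : Int :=
  ((PySem.List.pyRange 0 n 1).foldl (fun s _ => stepA x s) (a, n, 0)).2.2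

-- ===== PORT B =====
-- port of Source B's `_lowbound` (while loop as structural recursion on hi - lo);
-- arr[mid] is in range whenever the loop runs on the inputs B reaches (getD 0 is a totality guard)
def lowbound (arr : List Int) (val : Int) (lo hi : Nat) : Nat :=
  if h : lo < hi then
    -- Python's (lo+hi)//2 on the loop's non-negative ints is exactly Nat division
    if arr.getD ((lo + hi) / 2) 0 < val then lowbound arr val ((lo + hi) / 2 + 1) hi
    else lowbound arr val lo ((lo + hi) / 2)
  else lo
termination_by hi - lo
decreasing_by all_goals omega

-- port of Source B's `_group_start` (same loop, comparing first components)
def groupStart (S : List (Int × Int)) (vmax : Int) (lo hi : Nat) : Nat :=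
  if h : lo < hi then
    if (S.getD ((lo + hi) / 2) (0, 0)).1 < vmax then groupStart S vmax ((lo + hi) / 2 + 1) hi
    else groupStart S vmax lo ((lo + hi) / 2)
  else lo
termination_by hi - lo
decreasing_by all_goals omega

-- loop body of B's `for _ in range(n)` (state: sorted pair list S, alive positions POS, idx, cost)
def stepB (x : Int) (s : List (Int × Int) × List Int × Int × Int) :
    List (Int × Int) × List Int × Int × Int :=
  match PySem.List.pyGet? s.1 (-1) with
  | none => s            -- Python: S[-1] raises IndexError on empty (outside Pre_)
  | some last =>
    let vmax := last.1
    let j := groupStart s.1 vmax 0 (s.1.length - 1)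
    let pstar := (s.1.getD j (0, 0)).2
    let t := lowbound s.2.1 pstar 0 s.2.1.length
    let r := s.2.2.1 - (t : Int) - 1
    if x < r then
      let i0 := lowbound s.2.1 (s.1.getD 0 (0, 0)).2 0 s.2.1.length
      (((PySem.List.pop? s.1 0).map Prod.snd).getD s.1, s.2.1.eraseIdx i0,
        s.2.2.1 - 1, s.2.2.2 + x)
    else
      (((PySem.List.pop? s.1 (j : Int)).map Prod.snd).getD s.1, s.2.1.eraseIdx t,
        s.2.2.1 - 1, s.2.2.2 + r)

def check_min_cost_alt (n : Int) (x : Int) (a : List Int) : Int :=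
  let pairs := (PySem.List.enumerate a 0).map (fun pv => (pv.2, pv.1))
  let S := PySem.List.sorted2 pairs Prod.fst Prod.snd
  let POS := PySem.List.pyRange 0 (a.length : Int) 1
  ((PySem.List.pyRange 0 n 1).foldl (fun s _ => stepB x s) (S, POS, n, 0)).2.2.2

-- ===== PRECONDITION & SPEC =====
-- A raises ValueError (max of an empty list) exactly when n > len(a); Pre_ is exactly where A returns.
def Pre_check_min_cost (n : Int) (x : Int) (a : List Int) : Prop := n ≤ (a.length : Int)
instance (n : Int) (x : Int) (a : List Int) : Decidable (Pre_check_min_cost n x a) := by unfold Pre_check_min_cost; infer_instance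

def pvWitness_check_min_cost : Int × Int × List Int := (4, 2, [3, 1, 4, 1])

def Spec_check_min_cost (n : Int) (x : Int) (a : List Int) (out : Int) : Prop := out = check_min_cost_alt n x a
instance (n : Int) (x : Int) (a : List Int) (out : Int) : Decidable (Spec_check_min_cost n x a out) := by unfold Spec_check_min_cost; infer_instance

-- ===== CLAIM (what is proved, stated in full; the proofs are below) =====
def Claim_equal_check_min_cost : Prop := ∀ (n : Int) (x : Int) (a : List Int), Dom_check_min_cost n x a → Pre_check_min_cost n x a → Spec_check_min_cost n x a (check_min_cost n x a)

-- ===== LEMMAS AND PROOFS =====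

-- the coupling: S is a lex-sorted permutation of the position-decorated list P,
-- P's positions strictly increase along P, and A's list is P's value column.
def LexLe (u v : Int × Int) : Prop := (toLex u : Int ×ₗ Int) ≤ toLex v


lemma LexLe_iff (u v : Int × Int) : LexLe u v ↔ (u.1 < v.1 ∨ (u.1 = v.1 ∧ u.2 ≤ v.2)) :=
  Prod.Lex.le_iff

lemma last_isMax (S : List (Int × Int)) (z : Int × Int)
    (hs : S.Pairwise LexLe) (hz : S.getLast? = some z) : ∀ y ∈ S, LexLe y z := by
  obtain ⟨S', rfl⟩ := List.getLast?_eq_some_iff.mp hz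
  intro y hy
  rcases List.mem_append.mp hy with h | h
  · exact (List.pairwise_append.mp hs).2.2 y h z (List.mem_singleton_self z)
  · rw [List.mem_singleton.mp h]; exact le_refl _

lemma head_isMin (S' : List (Int × Int)) (z : Int × Int)
    (hs : (z :: S').Pairwise LexLe) : ∀ y ∈ z :: S', LexLe z y := by
  intro y hy
  rcases List.mem_cons.mp hy with rfl | h
  · exact le_refl _
  · exact (List.pairwise_cons.mp hs).1 y h

lemma first_occ (P : List (Int × Int)) (v : Int) (k : Nat)
    (h : PySem.List.index? (P.map Prod.fst) v = some k) :
    ∃ P₁ e P₂, P = P₁ ++ e :: P₂ ∧ e.1 = v ∧ v ∉ P₁.map Prod.fst ∧ P₁.length = k := by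
  obtain ⟨pre, suf, heq, hlen, hnot⟩ := (PySem.List.index?_eq_some_iff _ _ _).mp h
  obtain ⟨P₁, P₂', hP, hpre, hsuf⟩ := List.map_eq_append_iff.mp heq
  obtain ⟨e, P₂, hP₂, he, hmap⟩ := List.map_eq_cons_iff.mp hsuf
  exact ⟨P₁, e, P₂, by rw [hP, hP₂], he, by rw [hpre]; exact hnot,
    by rw [← hlen, ← hpre, List.length_map]⟩

lemma snd_lt_of_pre (P₁ P₂ : List (Int × Int)) (e : Int × Int)
    (hmono : (P₁ ++ e :: P₂).Pairwise (fun u v => u.2 < v.2)) :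
    (∀ f ∈ P₁, f.2 < e.2) ∧ (∀ f ∈ P₂, e.2 < f.2) := by
  have h := List.pairwise_append.mp hmono
  exact ⟨fun f hf => h.2.2 f hf e (List.mem_cons_self),
    fun f hf => (List.pairwise_cons.mp h.2.1).1 f hf⟩

lemma min_snd (P₁ P₂ : List (Int × Int)) (e : Int × Int) (v : Int)
    (hmono : (P₁ ++ e :: P₂).Pairwise (fun u v => u.2 < v.2))
    (hv : e.1 = v) (hnot : v ∉ P₁.map Prod.fst) :
    ∀ f ∈ P₁ ++ e :: P₂, f.1 = v → e.2 ≤ f.2 := by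
  obtain ⟨h1, h2⟩ := snd_lt_of_pre P₁ P₂ e hmono
  intro f hf hfv
  rcases List.mem_append.mp hf with h | h
  · exact absurd (hfv ▸ List.mem_map_of_mem h) hnot
  · rcases List.mem_cons.mp h with rfl | h
    · exact le_refl _
    · exact le_of_lt (h2 f h)

lemma erase_first {α : Type} [BEq α] [LawfulBEq α] (l₁ l₂ : List α) (v : α)
    (hnot : v ∉ l₁) : (l₁ ++ v :: l₂).erase v = l₁ ++ l₂ := by
  rw [List.erase_append_right _ hnot, List.erase_cons_head]

lemma eraseIdx_mid {α : Type} (pre suf : List α) (m : α) :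
    (pre ++ m :: suf).eraseIdx pre.length = pre ++ suf := by
  induction pre with
  | nil => rfl
  | cons p pre ih => simpa using ih

lemma sorted2_pairs_eq (xs : List (Int × Int)) :
    PySem.List.sorted2 xs Prod.fst Prod.snd
      = PySem.List.sorted xs (fun e => (toLex e : Int ×ₗ Int)) := by
  rw [PySem.List.sorted_eq_foldl_insertBy]
  unfold PySem.List.sorted2
  simp only [if_false, Bool.false_eq_true]
  congr 1
  funext acc x
  congr 1
  funext a b
  have hlt : ((toLex a : Int ×ₗ Int) < toLex b) ↔ (a.1 < b.1 ∨ (a.1 = b.1 ∧ a.2 < b.2)) :=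
    Prod.Lex.lt_iff
  by_cases h1 : a.1 < b.1 <;> by_cases h2 : b.1 < a.1 <;> by_cases h3 : a.2 < b.2 <;>
    simp [h1, h2, h3, hlt] <;> omega

lemma lowbound_spec (arr : List Int) (val : Int) (r : Nat) :
    ∀ (fuel lo hi : Nat), hi - lo ≤ fuel → lo ≤ r → r ≤ hi → hi ≤ arr.length →
    (∀ i, lo ≤ i → i < r → arr.getD i 0 < val) →
    (∀ i, r ≤ i → i < hi → val ≤ arr.getD i 0) →
    lowbound arr val lo hi = r := by
  intro fuel
  induction fuel with
  | zero =>
    intro lo hi h1 h2 h3 _ _ _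
    unfold lowbound
    rw [dif_neg (by omega)]
    omega
  | succ f ih =>
    intro lo hi hf h2 h3 h4 hlt hge
    unfold lowbound
    by_cases h : lo < hi
    · rw [dif_pos h]
      by_cases hv : arr.getD ((lo + hi) / 2) 0 < val
      · rw [if_pos hv]
        have hmr : (lo + hi) / 2 + 1 ≤ r := by
          by_contra hc
          have := hge ((lo + hi) / 2) (by omega) (by omega)
          omega
        exact ih ((lo + hi) / 2 + 1) hi (by omega) hmr h3 h4
          (fun i ha hb => hlt i (by omega) hb) hge
      · rw [if_neg hv]
        have hrm : r ≤ (lo + hi) / 2 := by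
          by_contra hc
          have := hlt ((lo + hi) / 2) (by omega) (by omega)
          omega
        exact ih lo ((lo + hi) / 2) (by omega) h2 hrm (by omega) hlt
          (fun i ha hb => hge i ha (by omega))
    · rw [dif_neg h]; omega

lemma groupStart_spec (S : List (Int × Int)) (val : Int) (r : Nat) :
    ∀ (fuel lo hi : Nat), hi - lo ≤ fuel → lo ≤ r → r ≤ hi → hi ≤ S.length →
    (∀ i, lo ≤ i → i < r → (S.getD i (0, 0)).1 < val) →
    (∀ i, r ≤ i → i < hi → val ≤ (S.getD i (0, 0)).1) →
    groupStart S val lo hi = r := by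
  intro fuel
  induction fuel with
  | zero =>
    intro lo hi h1 h2 h3 _ _ _
    unfold groupStart
    rw [dif_neg (by omega)]
    omega
  | succ f ih =>
    intro lo hi hf h2 h3 h4 hlt hge
    unfold groupStart
    by_cases h : lo < hi
    · rw [dif_pos h]
      by_cases hv : (S.getD ((lo + hi) / 2) (0, 0)).1 < val
      · rw [if_pos hv]
        have hmr : (lo + hi) / 2 + 1 ≤ r := by
          by_contra hc
          have := hge ((lo + hi) / 2) (by omega) (by omega)
          omega
        exact ih ((lo + hi) / 2 + 1) hi (by omega) hmr h3 h4
          (fun i ha hb => hlt i (by omega) hb) hge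
      · rw [if_neg hv]
        have hrm : r ≤ (lo + hi) / 2 := by
          by_contra hc
          have := hlt ((lo + hi) / 2) (by omega) (by omega)
          omega
        exact ih lo ((lo + hi) / 2) (by omega) h2 hrm (by omega) hlt
          (fun i ha hb => hge i ha (by omega))
    · rw [dif_neg h]; omega

lemma lowbound_split (A₁ A₂ : List Int) (v : Int) (hi : Nat)
    (h1 : ∀ y ∈ A₁, y < v) (h2 : ∀ y ∈ A₂, v ≤ y)
    (hr : A₁.length ≤ hi) (hhi : hi ≤ A₁.length + 1 + A₂.length) :
    lowbound (A₁ ++ v :: A₂) v 0 hi = A₁.length := by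
  have hlen : (A₁ ++ v :: A₂).length = A₁.length + 1 + A₂.length := by simp; omega
  apply lowbound_spec (A₁ ++ v :: A₂) v A₁.length hi 0 hi (by omega) (by omega) hr (by omega)
  · intro i _ hir
    have hil : i < (A₁ ++ v :: A₂).length := by omega
    rw [List.getD_eq_getElem _ _ hil, List.getElem_append_left hir]
    exact h1 _ (List.getElem_mem _)
  · intro i hri hih
    have hil : i < (A₁ ++ v :: A₂).length := by omega
    rw [List.getD_eq_getElem _ _ hil, List.getElem_append_right hri]
    rcases List.mem_cons.mp (List.getElem_mem _) with hcv | hcv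
    · rw [hcv]
    · exact h2 _ hcv

lemma groupStart_split (U V : List (Int × Int)) (e : Int × Int) (v : Int) (hi : Nat)
    (hev : e.1 = v)
    (h1 : ∀ u ∈ U, u.1 < v) (h2 : ∀ w ∈ V, v ≤ w.1)
    (hr : U.length ≤ hi) (hhi : hi ≤ U.length + 1 + V.length) :
    groupStart (U ++ e :: V) v 0 hi = U.length := by
  have hlen : (U ++ e :: V).length = U.length + 1 + V.length := by simp; omega
  apply groupStart_spec (U ++ e :: V) v U.length hi 0 hi (by omega) (by omega) hr (by omega)
  · intro i _ hir
    have hil : i < (U ++ e :: V).length := by omega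
    rw [List.getD_eq_getElem _ _ hil, List.getElem_append_left hir]
    exact h1 _ (List.getElem_mem _)
  · intro i hri hih
    have hil : i < (U ++ e :: V).length := by omega
    rw [List.getD_eq_getElem _ _ hil, List.getElem_append_right hri]
    rcases List.mem_cons.mp (List.getElem_mem _) with hcv | hcv
    · rw [hcv]; omega
    · exact h2 _ hcv

lemma step_match (x idx cost : Int) (P S : List (Int × Int)) (hne : P ≠ [])
    (hmono : P.Pairwise (fun u v => u.2 < v.2))
    (hperm : S.Perm P) (hsort : S.Pairwise LexLe) :
    ∃ P' S' c',
      stepA x (P.map Prod.fst, idx, cost) = (P'.map Prod.fst, idx - 1, c') ∧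
      stepB x (S, P.map Prod.snd, idx, cost) = (S', P'.map Prod.snd, idx - 1, c') ∧
      P'.Pairwise (fun u v => u.2 < v.2) ∧ S'.Perm P' ∧ S'.Pairwise LexLe ∧
      P'.length + 1 = P.length := by
  have hane : P.map Prod.fst ≠ [] := by simpa using hne
  -- A side: the maximum value m and the index k of its first occurrence
  obtain ⟨m, hmax⟩ : ∃ m, PySem.List.max? (P.map Prod.fst) (fun v => v) = some m := by
    cases hmt : PySem.List.max? (P.map Prod.fst) (fun v => v) with
    | none => exact absurd ((PySem.List.max?_eq_none_iff _ _).mp hmt) hane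
    | some m => exact ⟨m, rfl⟩
  have hm_mem : m ∈ P.map Prod.fst := PySem.List.max?_mem hmax
  have hm_max : ∀ y ∈ P.map Prod.fst, y ≤ m := fun y hy => PySem.List.max?_isMax hmax y hy
  obtain ⟨k, hidx⟩ : ∃ k, PySem.List.index? (P.map Prod.fst) m = some k := by
    cases hit : PySem.List.index? (P.map Prod.fst) m with
    | none => exact absurd ((PySem.List.index?_eq_none_iff _ _).mp hit) (by simpa using hm_mem)
    | some k => exact ⟨k, rfl⟩
  obtain ⟨P₁, e, P₂, hPdec, he1, hnot1, hk⟩ := first_occ P m k hidx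
  have heP : e ∈ P := by rw [hPdec]; exact List.mem_append_right _ List.mem_cons_self
  -- S side: the last element z
  have hSne : S ≠ [] := by
    intro h; rw [h] at hperm; exact hne hperm.nil_eq.symm
  obtain ⟨z, hz⟩ : ∃ z, S.getLast? = some z := by
    cases hzt : S.getLast? with
    | none => exact absurd (List.getLast?_eq_none_iff.mp hzt) hSne
    | some z => exact ⟨z, rfl⟩
  have hget : PySem.List.pyGet? S (-1) = some z := by
    rw [PySem.List.pyGet?_neg_one, hz]
  have hzS : z ∈ S := List.mem_of_getLast? hz
  have hzP : z ∈ P := hperm.subset hzS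
  have heS : e ∈ S := hperm.mem_iff.mpr heP
  have hlastmax := last_isMax S z hsort hz
  -- z.1 = m
  have hzm : z.1 = m := by
    have h1 : z.1 ≤ m := hm_max z.1 (List.mem_map_of_mem hzP)
    have h2 : e.1 ≤ z.1 := by
      have := (LexLe_iff e z).mp (hlastmax e heS)
      omega
    omega
  -- no duplicate pairs (positions are distinct)
  have hnodupP : P.Nodup := hmono.imp (fun {u v} h => by intro he; rw [he] at h; omega)
  have hnodupS : S.Nodup := hperm.nodup_iff.mpr hnodupP
  -- split S at e (the lexicographically least pair of value m)
  obtain ⟨U, V, hSUV⟩ := List.append_of_mem heS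
  have heU : e ∉ U := by
    intro hmem
    have h := hSUV ▸ hnodupS
    exact (List.disjoint_of_nodup_append h) hmem List.mem_cons_self
  have hsortUV : (U ++ e :: V).Pairwise LexLe := hSUV ▸ hsort
  have hU : ∀ u ∈ U, u.1 < m := by
    intro u hu
    have hle : LexLe u e := (List.pairwise_append.mp hsortUV).2.2 u hu e List.mem_cons_self
    rcases (LexLe_iff u e).mp hle with h | ⟨h1', h2'⟩
    · omega
    · exfalso
      have huP : u ∈ P := hperm.subset (hSUV ▸ List.mem_append_left _ hu)
      have hu1 : u.1 = m := by omega
      have h3' : e.2 ≤ u.2 :=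
        min_snd P₁ P₂ e m (hPdec ▸ hmono) he1 hnot1 u (hPdec ▸ huP) hu1
      have : u = e := Prod.ext (by omega) (by omega)
      exact heU (this ▸ hu)
  have hV : ∀ w ∈ V, m ≤ w.1 := by
    intro w hw
    have hle : LexLe e w :=
      (List.pairwise_cons.mp (List.pairwise_append.mp hsortUV).2.1).1 w hw
    have := (LexLe_iff e w).mp hle
    omega
  have hSlen : S.length = U.length + 1 + V.length := by rw [hSUV]; simp; omega
  -- the group-start binary search finds e
  have hjlen : groupStart S z.1 0 (S.length - 1) = U.length := by
    rw [hzm, hSUV]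
    exact groupStart_split U V e m ((U ++ e :: V).length - 1) he1 hU hV
      (by simp only [List.length_append, List.length_cons]; omega)
      (by simp only [List.length_append, List.length_cons]; omega)
  have hSj : S.getD U.length (0, 0) = e := by
    rw [hSUV, List.getD_eq_getElem _ _ (by simp), List.getElem_append_right (le_refl _)]
    simp
  -- the position binary search computes k (= A's temp)
  have hPOS : P.map Prod.snd = P₁.map Prod.snd ++ e.2 :: P₂.map Prod.snd := by
    rw [hPdec]; simp
  have hsnd := snd_lt_of_pre P₁ P₂ e (hPdec ▸ hmono)
  have htval : lowbound (P.map Prod.snd) e.2 0 (P.map Prod.snd).length = k := by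
    rw [hPOS]
    have h := lowbound_split (P₁.map Prod.snd) (P₂.map Prod.snd) e.2
      ((P₁.map Prod.snd ++ e.2 :: P₂.map Prod.snd).length)
      (fun y hy => by obtain ⟨f, hf, rfl⟩ := List.mem_map.mp hy; exact hsnd.1 f hf)
      (fun y hy => by obtain ⟨f, hf, rfl⟩ := List.mem_map.mp hy; exact le_of_lt (hsnd.2 f hf))
      (by simp) (by simp; omega)
    rw [h, List.length_map, hk]
  have hklen : k < P.length := by
    rw [hPdec]; simp; omega
  have herasePOS : (P.map Prod.snd).eraseIdx k = (P₁ ++ P₂).map Prod.snd := by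
    have h := eraseIdx_mid (P₁.map Prod.snd) (P₂.map Prod.snd) e.2
    rw [List.length_map, hk] at h
    rw [hPOS, List.map_append]
    exact h
  by_cases hc : x < idx - (k : Int) - 1
  · -- MIN branch: A removes the first minimum, B pops the head of S
    obtain ⟨mn, hmin⟩ : ∃ mn, PySem.List.min? (P.map Prod.fst) (fun v => v) = some mn := by
      cases hmt : PySem.List.min? (P.map Prod.fst) (fun v => v) with
      | none => exact absurd ((PySem.List.min?_eq_none_iff _ _).mp hmt) hane
      | some mn => exact ⟨mn, rfl⟩
    have hmn_mem : mn ∈ P.map Prod.fst := PySem.List.min?_mem hmin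
    have hmn_min : ∀ y ∈ P.map Prod.fst, mn ≤ y := fun y hy => PySem.List.min?_isMin hmin y hy
    obtain ⟨k₂, hidx₂⟩ : ∃ k₂, PySem.List.index? (P.map Prod.fst) mn = some k₂ := by
      cases hit : PySem.List.index? (P.map Prod.fst) mn with
      | none => exact absurd ((PySem.List.index?_eq_none_iff _ _).mp hit) (by simpa using hmn_mem)
      | some k₂ => exact ⟨k₂, rfl⟩
    obtain ⟨Q₁, e₂, Q₂, hQdec, he₂1, hnot₂, hk₂⟩ := first_occ P mn k₂ hidx₂
    obtain ⟨s₀, S₁, rfl⟩ : ∃ s₀ S₁, S = s₀ :: S₁ := by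
      cases S with
      | nil => exact absurd rfl hSne
      | cons s₀ S₁ => exact ⟨s₀, S₁, rfl⟩
    have he₂P : e₂ ∈ P := by rw [hQdec]; exact List.mem_append_right _ List.mem_cons_self
    have he₂S : e₂ ∈ s₀ :: S₁ := hperm.mem_iff.mpr he₂P
    have hheadmin := head_isMin S₁ s₀ hsort
    have hs₀P : s₀ ∈ P := hperm.subset List.mem_cons_self
    have hs₀1 : s₀.1 = mn := by
      have h1 : mn ≤ s₀.1 := hmn_min s₀.1 (List.mem_map_of_mem hs₀P)
      have h2 : s₀.1 ≤ e₂.1 := by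
        have := (LexLe_iff s₀ e₂).mp (hheadmin e₂ he₂S)
        omega
      omega
    have hs₀e : s₀ = e₂ := by
      have h1 : e₂.2 ≤ s₀.2 :=
        min_snd Q₁ Q₂ e₂ mn (hQdec ▸ hmono) he₂1 hnot₂ s₀ (hQdec ▸ hs₀P) hs₀1
      have h2 : s₀.2 ≤ e₂.2 := by
        have := (LexLe_iff s₀ e₂).mp (hheadmin e₂ he₂S)
        omega
      have : s₀.2 = e₂.2 := le_antisymm h2 h1
      exact Prod.ext (by rw [hs₀1, he₂1]) this
    have he₂Q₁ : e₂ ∉ Q₁ := by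
      intro hmem
      have := (snd_lt_of_pre Q₁ Q₂ e₂ (hQdec ▸ hmono)).1 e₂ hmem
      omega
    have haform : P.map Prod.fst = Q₁.map Prod.fst ++ mn :: Q₂.map Prod.fst := by
      rw [hQdec]; simp [he₂1]
    have herase : (P.map Prod.fst).erase mn = (Q₁ ++ Q₂).map Prod.fst := by
      rw [haform, erase_first _ _ _ hnot₂, List.map_append]
    have hsnd₂ := snd_lt_of_pre Q₁ Q₂ e₂ (hQdec ▸ hmono)
    have hi0 : lowbound (P.map Prod.snd) s₀.2 0 (P.map Prod.snd).length = k₂ := by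
      rw [hs₀e]
      have hPOS₂ : P.map Prod.snd = Q₁.map Prod.snd ++ e₂.2 :: Q₂.map Prod.snd := by
        rw [hQdec]; simp
      rw [hPOS₂]
      have h := lowbound_split (Q₁.map Prod.snd) (Q₂.map Prod.snd) e₂.2
        ((Q₁.map Prod.snd ++ e₂.2 :: Q₂.map Prod.snd).length)
        (fun y hy => by obtain ⟨f, hf, rfl⟩ := List.mem_map.mp hy; exact hsnd₂.1 f hf)
        (fun y hy => by obtain ⟨f, hf, rfl⟩ := List.mem_map.mp hy; exact le_of_lt (hsnd₂.2 f hf))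
        (by simp) (by simp; omega)
      rw [h, List.length_map, hk₂]
    have herasePOS₂ : (P.map Prod.snd).eraseIdx k₂ = (Q₁ ++ Q₂).map Prod.snd := by
      have h := eraseIdx_mid (Q₁.map Prod.snd) (Q₂.map Prod.snd) e₂.2
      rw [List.length_map, hk₂] at h
      rw [hQdec]; simp only [List.map_append, List.map_cons]
      exact h
    refine ⟨Q₁ ++ Q₂, S₁, cost + x, ?_, ?_, ?_, ?_, ?_, ?_⟩
    · simp only [stepA, hmax, hidx, hmin, Option.getD_some]
      rw [if_pos (by simpa using hc)]
      rw [PySem.List.remove?_eq_some_erase _ mn hmn_mem]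
      simp [herase]
    · simp only [stepB, hget]
      rw [hjlen, hSj, htval]
      rw [if_pos (by simpa using hc)]
      have hgd0 : (s₀ :: S₁).getD 0 (0, 0) = s₀ := rfl
      rw [hgd0, hi0, herasePOS₂]
      simp [PySem.List.pop?_zero_cons]
    · exact hmono.sublist (by rw [hQdec]; exact (Q₂.sublist_cons_self e₂).append_left Q₁)
    · have h1 : ((s₀ :: S₁).erase s₀).Perm (P.erase s₀) := hperm.erase s₀
      rw [List.erase_cons_head] at h1
      rw [hs₀e, hQdec, erase_first _ _ _ he₂Q₁] at h1
      exact h1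
    · exact (List.pairwise_cons.mp hsort).2
    · rw [hQdec]; simp; omega
  · -- MAX branch: both remove the first occurrence of the maximum
    have hkl : k < (P.map Prod.fst).length := by
      rw [hPdec]; simp; omega
    have haform : P.map Prod.fst = P₁.map Prod.fst ++ m :: P₂.map Prod.fst := by
      rw [hPdec]; simp [he1]
    have heP₁ : e ∉ P₁ := by
      intro hmem
      have := (snd_lt_of_pre P₁ P₂ e (hPdec ▸ hmono)).1 e hmem
      omega
    have heraseIdx : (P.map Prod.fst).eraseIdx k = (P₁ ++ P₂).map Prod.fst := by
      have h := eraseIdx_mid (P₁.map Prod.fst) (P₂.map Prod.fst) m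
      rw [List.length_map, hk] at h
      rw [haform, List.map_append]
      exact h
    refine ⟨P₁ ++ P₂, S.erase e, cost + (idx - (k : Int) - 1), ?_, ?_, ?_, ?_, ?_, ?_⟩
    · simp only [stepA, hmax, hidx, Option.getD_some]
      rw [if_neg (by simpa using hc)]
      rw [PySem.List.pop?_natCast _ k hkl]
      simp [heraseIdx]
    · simp only [stepB, hget]
      rw [hjlen, hSj, htval]
      rw [if_neg (by simpa using hc)]
      have hpopS : PySem.List.pop? S ((U.length : Nat) : Int) = some (S[U.length], S.eraseIdx U.length) :=
        PySem.List.pop?_natCast _ _ (by omega)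
      rw [hpopS, herasePOS]
      have hSerase : S.eraseIdx U.length = S.erase e := by
        rw [hSUV, eraseIdx_mid, erase_first _ _ _ heU]
      simp [hSerase]
    · exact hmono.sublist (by rw [hPdec]; exact (P₂.sublist_cons_self e).append_left P₁)
    · have h1 : (S.erase e).Perm (P.erase e) := hperm.erase e
      rw [hPdec, erase_first _ _ _ heP₁] at h1
      exact h1
    · exact hsort.sublist (List.erase_sublist)
    · rw [hPdec]; simp; omega

lemma loop_eq (x : Int) :
    ∀ (l : List Int) (P S : List (Int × Int)) (idx cost : Int),
      P.Pairwise (fun u v => u.2 < v.2) → S.Perm P → S.Pairwise LexLe →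
      l.length ≤ P.length →
      (l.foldl (fun s _ => stepA x s) (P.map Prod.fst, idx, cost)).2.2
        = (l.foldl (fun s _ => stepB x s) (S, P.map Prod.snd, idx, cost)).2.2.2 := by
  intro l
  induction l with
  | nil => intro P S idx cost _ _ _ _; rfl
  | cons h l ih =>
    intro P S idx cost hmono hperm hsort hlen
    have hne : P ≠ [] := by
      intro hP; rw [hP] at hlen; simp at hlen
    obtain ⟨P', S', c', hA, hB, hmono', hperm', hsort', hlen'⟩ :=
      step_match x idx cost P S hne hmono hperm hsort
    simp only [List.foldl_cons, hA, hB]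
    exact ih P' S' (idx - 1) c' hmono' hperm' hsort' (by simp at hlen ⊢; omega)

-- ===== VERDICT (by name: the statement is the Claim_ definition above) =====
theorem check_min_cost_spec : Claim_equal_check_min_cost := by
  intro n x a _ hpre
  unfold Pre_check_min_cost at hpre
  unfold Spec_check_min_cost check_min_cost check_min_cost_alt
  have hP : ((PySem.List.enumerate a 0).map (fun pv => (pv.2, pv.1))).map Prod.fst = a := by
    rw [List.map_map]; exact PySem.List.map_snd_enumerate a 0
  have hmono : ((PySem.List.enumerate a 0).map (fun pv => (pv.2, pv.1))).Pairwise
      (fun u v => u.2 < v.2) :=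
    (PySem.List.pairwise_lt_enumerate a 0).map _ (fun u v h => h)
  have hperm :
      (PySem.List.sorted2 ((PySem.List.enumerate a 0).map (fun pv => (pv.2, pv.1)))
          Prod.fst Prod.snd).Perm
        ((PySem.List.enumerate a 0).map (fun pv => (pv.2, pv.1))) :=
    PySem.List.sorted2_perm _ _ _ _
  have hsort :
      (PySem.List.sorted2 ((PySem.List.enumerate a 0).map (fun pv => (pv.2, pv.1)))
          Prod.fst Prod.snd).Pairwise LexLe := by
    rw [sorted2_pairs_eq]; exact PySem.List.sorted_pairwise _ _
  have hlen : (PySem.List.pyRange 0 n 1).length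
      ≤ ((PySem.List.enumerate a 0).map (fun pv => (pv.2, pv.1))).length := by
    rw [PySem.List.length_pyRange_one]
    simp [PySem.List.length_enumerate]
    omega
  have hPOS0 : ((PySem.List.enumerate a 0).map (fun pv => (pv.2, pv.1))).map Prod.snd
      = PySem.List.pyRange 0 (a.length : Int) 1 := by
    rw [List.map_map]
    have h := PySem.List.map_fst_enumerate a 0
    simpa using h
  calc ((PySem.List.pyRange 0 n 1).foldl (fun s _ => stepA x s) (a, n, 0)).2.2
      = ((PySem.List.pyRange 0 n 1).foldl (fun s _ => stepA x s)
          (((PySem.List.enumerate a 0).map (fun pv => (pv.2, pv.1))).map Prod.fst, n, 0)).2.2 := by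
        rw [hP]
    _ = ((PySem.List.pyRange 0 n 1).foldl (fun s _ => stepB x s)
          (PySem.List.sorted2 ((PySem.List.enumerate a 0).map (fun pv => (pv.2, pv.1)))
            Prod.fst Prod.snd,
           ((PySem.List.enumerate a 0).map (fun pv => (pv.2, pv.1))).map Prod.snd,
           n, 0)).2.2.2 := loop_eq x _ _ _ n 0 hmono hperm hsort hlen
    _ = _ := by rw [hPOS0]
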